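-- pv_equiv track=rewrite | github.com/BjoernBoss/ustring | generated/generate.py | _TranslateCleanupCaseMap
-- ===== SOURCE A (Python) =====
-- def _TranslateCleanupCaseMap(values: tuple[int], foldFlag: int, lowerFlag: int, upperFlag: int, titleFlag: int, nullCondition: int, valueMask: int) -> tuple[int]:
-- 	if len(values) == 1:
-- 		return values
-- 	indices, modified = [0], [v for v in values]
--
-- 	# setup the list of all indices of the starting conditions
-- 	while True:
-- 		next = indices[-1] + values[indices[-1] + 1] + 2
-- 		if next >= len(values):
-- 			break
-- 		indices.append(next)
--
-- 	# iterate over the conditions in reverse and clear all flags for conditions, for which the upcoming default already results in the same value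
-- 	foldDef, lowerDef, upperDef, titleDef = [0], [0], [0], [0]
-- 	for i in range(len(indices) - 1, -1, -1):
-- 		iValues = modified[indices[i] + 2:indices[i] + 2 + modified[indices[i] + 1]]
--
-- 		# iterate over the flags and check if they can be removed from the current index
-- 		for f, d in [(foldFlag, foldDef), (lowerFlag, lowerDef), (upperFlag, upperDef), (titleFlag, titleDef)]:
-- 			if (modified[indices[i]] & f) == 0:
-- 				continue
-- 			if iValues == d:
-- 				modified[indices[i]] ^= f
--
-- 		# update the default values for all null-conditions and clear the current condition-bits for
-- 		# all upcoming values, as this is a null-condition and will therefore be true at all times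
-- 		if (modified[indices[i]] & valueMask) == nullCondition:
-- 			for j in range(i + 1, len(indices)):
-- 				modified[indices[j]] &= ~(modified[indices[i]] & (foldFlag | lowerFlag | upperFlag | titleFlag))
-- 			if (modified[indices[i]] & foldFlag) != 0:
-- 				foldDef = iValues
-- 			if (modified[indices[i]] & lowerFlag) != 0:
-- 				lowerDef = iValues
-- 			if (modified[indices[i]] & upperFlag) != 0:
-- 				upperDef = iValues
-- 			if (modified[indices[i]] & titleFlag) != 0:
-- 				titleDef = iValues
--
-- 		# null the default-values as they will not be reached anymore
-- 		else:
-- 			if (modified[indices[i]] & foldFlag) != 0: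
-- 				foldDef = None
-- 			if (modified[indices[i]] & lowerFlag) != 0:
-- 				lowerDef = None
-- 			if (modified[indices[i]] & upperFlag) != 0:
-- 				upperDef = None
-- 			if (modified[indices[i]] & titleFlag) != 0:
-- 				titleDef = None
--
-- 	# remove all indices, which have empty casing-flags, and merge neighboring similar types
-- 	out, last, typeFlags = [], None, (foldFlag | lowerFlag | upperFlag | titleFlag)
-- 	for index in indices:
-- 		if (modified[index] & typeFlags) == 0:
-- 			continue
-- 		iValues = modified[index:index + 2 + modified[index + 1]]
--
-- 		# check if the value is identical to the last value (except for the type-flags)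
-- 		if last is not None and out[last + 2:] == iValues[2:] and (out[last] & ~typeFlags) == (modified[index] & ~typeFlags):
-- 			out[last] |= (modified[index] & typeFlags)
-- 		else:
-- 			last, out = len(out), out + iValues
-- 	return tuple(out)
-- ===== SOURCE B (Python) =====
-- # B: parse the packed table once into (flags, count, values) entries, do one reverse
-- # pass that drops redundant flags against the running defaults, then one forward pass
-- # that applies an accumulated clear-mask from null-conditions and compacts - the
-- # per-null-condition rescan of all later entries in A is replaced by the accumulated
-- # mask, making the flag-clearing linear in the number of conditions.
-- def _TranslateCleanupCaseMap(values, foldFlag, lowerFlag, upperFlag, titleFlag, nullCondition, valueMask):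
-- 	if len(values) == 1:
-- 		return values
-- 	typeFlags = foldFlag | lowerFlag | upperFlag | titleFlag
--
-- 	# single parse pass over the flat table
-- 	entries, rest = [], list(values)
-- 	while rest:
-- 		cnt = rest[1]
-- 		entries.append((rest[0], cnt, rest[2:2 + cnt]))
-- 		rest = rest[2 + cnt:]
--
-- 	# reverse pass: drop flags whose upcoming default yields the same values already,
-- 	# and remember each entry's null-ness (computed from its post-drop flags)
-- 	defs = [[foldFlag, [0]], [lowerFlag, [0]], [upperFlag, [0]], [titleFlag, [0]]]
-- 	processed = []
-- 	for flags, cnt, vals in reversed(entries):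
-- 		for fd in defs:
-- 			if (flags & fd[0]) != 0 and vals == fd[1]:
-- 				flags ^= fd[0]
-- 		isNull = (flags & valueMask) == nullCondition
-- 		for fd in defs:
-- 			if (flags & fd[0]) != 0:
-- 				fd[1] = vals if isNull else None
-- 		processed.append((flags, cnt, vals, isNull))
-- 	processed.reverse()
--
-- 	# forward pass: accumulate the clear-mask of the null-conditions seen so far,
-- 	# drop entries left without casing flags, and merge equal neighbours
-- 	out, last, clear = [], None, 0
-- 	for flags, cnt, vals, isNull in processed:
-- 		final = flags & ~clear
-- 		if isNull:
-- 			clear |= flags & typeFlags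
-- 		if (final & typeFlags) == 0:
-- 			continue
-- 		if last is not None and out[last + 2:] == vals and (out[last] & ~typeFlags) == (final & ~typeFlags):
-- 			out[last] |= final & typeFlags
-- 		else:
-- 			last, out = len(out), out + [final, cnt] + vals
-- 	return tuple(out)
-- ===== Notes on version B (the rewrite author's own statement) =====
-- stated objective: faster
-- what changed: B parses the packed table once into (flags,count,values) entries and replaces A's per-null-condition rescan of all later conditions by a single forward pass with an accumulated clear-mask (plus one reverse pass for the defaults), so the flag-clearing is linear in the number of conditions instead of quadratic.
-- outside the precondition, e.g. on _TranslateCleanupCaseMap((1, -1, 4, 0), 1, 2, 4, 8, 0, 48): A returns (), B returns (1, -1)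
import Mathlib
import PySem

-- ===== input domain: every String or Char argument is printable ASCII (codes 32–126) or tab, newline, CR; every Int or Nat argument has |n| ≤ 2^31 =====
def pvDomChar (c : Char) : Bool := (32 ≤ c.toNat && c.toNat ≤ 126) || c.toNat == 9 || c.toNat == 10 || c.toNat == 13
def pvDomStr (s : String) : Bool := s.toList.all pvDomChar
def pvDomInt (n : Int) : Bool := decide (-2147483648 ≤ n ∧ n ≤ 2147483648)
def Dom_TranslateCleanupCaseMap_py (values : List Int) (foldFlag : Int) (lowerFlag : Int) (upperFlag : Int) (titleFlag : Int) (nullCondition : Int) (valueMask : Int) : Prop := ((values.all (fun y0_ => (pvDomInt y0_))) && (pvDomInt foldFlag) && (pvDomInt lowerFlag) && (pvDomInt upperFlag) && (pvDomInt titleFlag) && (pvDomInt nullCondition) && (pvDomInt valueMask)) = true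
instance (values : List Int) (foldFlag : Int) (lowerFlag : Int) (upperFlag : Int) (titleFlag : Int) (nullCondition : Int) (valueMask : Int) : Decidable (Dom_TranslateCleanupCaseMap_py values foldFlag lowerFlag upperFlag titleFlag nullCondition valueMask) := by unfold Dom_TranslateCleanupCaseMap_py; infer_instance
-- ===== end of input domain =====

-- B replaces A's per-null-condition rescan of all later conditions by one forward
-- accumulated-clear-mask pass over a table parsed once into entries (objective: faster).
-- ===== PORT A =====
-- A-side helpers: literal transliteration of _TranslateCleanupCaseMap (the flat in-place version).
-- 'while True' index chain; the fuel argument only makes the loop total (under Pre_ the loop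
-- breaks before the fuel runs out; fuel = len(values) suffices there).
def pvAIndices (values : List Int) : Nat → List Int → List Int
  | 0, idxs => idxs
  | fuel+1, idxs =>
    let last := PySem.List.pyGetD idxs (-1) 0
    let nxt := last + PySem.List.pyGetD values (last + 1) 0 + 2
    if (values.length : Int) ≤ nxt then idxs
    else pvAIndices values fuel (idxs ++ [nxt])

-- one 'if (modified[indices[i]] & f) == 0: continue; if iValues == d: modified[indices[i]] ^= f' step
def pvAFlag1 (m : List Int) (start : Int) (iValues : List Int) (f : Int) (d : Option (List Int)) : List Int :=
  if PySem.Int.band (PySem.List.pyGetD m start 0) f ≠ 0 ∧ d = some iValues then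
    PySem.List.pySetD m start (PySem.Int.bxor (PySem.List.pyGetD m start 0) f)
  else m

-- 'for j in range(i + 1, len(indices)): modified[indices[j]] &= ~(modified[indices[i]] & typeFlags)'
def pvAClear (indices : List Int) (start TF : Int) (i : Int) (m : List Int) : List Int :=
  (PySem.List.pyRange (i + 1) (PySem.List.len indices) 1).foldl (fun m j =>
    let pj := PySem.List.pyGetD indices j 0
    PySem.List.pySetD m pj (PySem.Int.band (PySem.List.pyGetD m pj 0)
      (Int.not (PySem.Int.band (PySem.List.pyGetD m start 0) TF)))) m

-- the body of 'for i in range(len(indices) - 1, -1, -1)'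
def pvA2Body (foldFlag lowerFlag upperFlag titleFlag nullCondition valueMask : Int)
    (indices : List Int)
    (st : List Int × Option (List Int) × Option (List Int) × Option (List Int) × Option (List Int))
    (i : Int) :
    List Int × Option (List Int) × Option (List Int) × Option (List Int) × Option (List Int) :=
  let m := st.1
  let start := PySem.List.pyGetD indices i 0
  let iValues := PySem.List.slice m (some (start + 2)) (some (start + 2 + PySem.List.pyGetD m (start + 1) 0))
  let m := pvAFlag1 m start iValues foldFlag st.2.1
  let m := pvAFlag1 m start iValues lowerFlag st.2.2.1
  let m := pvAFlag1 m start iValues upperFlag st.2.2.2.1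
  let m := pvAFlag1 m start iValues titleFlag st.2.2.2.2
  if PySem.Int.band (PySem.List.pyGetD m start 0) valueMask = nullCondition then
    let m := pvAClear indices start
      (PySem.Int.bor (PySem.Int.bor (PySem.Int.bor foldFlag lowerFlag) upperFlag) titleFlag) i m
    let fl := PySem.List.pyGetD m start 0
    (m, (if PySem.Int.band fl foldFlag ≠ 0 then some iValues else st.2.1),
        (if PySem.Int.band fl lowerFlag ≠ 0 then some iValues else st.2.2.1),
        (if PySem.Int.band fl upperFlag ≠ 0 then some iValues else st.2.2.2.1),
        (if PySem.Int.band fl titleFlag ≠ 0 then some iValues else st.2.2.2.2))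
  else
    let fl := PySem.List.pyGetD m start 0
    (m, (if PySem.Int.band fl foldFlag ≠ 0 then none else st.2.1),
        (if PySem.Int.band fl lowerFlag ≠ 0 then none else st.2.2.1),
        (if PySem.Int.band fl upperFlag ≠ 0 then none else st.2.2.2.1),
        (if PySem.Int.band fl titleFlag ≠ 0 then none else st.2.2.2.2))

-- the body of the final 'for index in indices' compaction loop
def pvA3Body (TF : Int) (m : List Int) (st : List Int × Option Int) (index : Int) : List Int × Option Int :=
  let out := st.1
  if PySem.Int.band (PySem.List.pyGetD m index 0) TF = 0 then st
  else
    let iValues := PySem.List.slice m (some index) (some (index + 2 + PySem.List.pyGetD m (index + 1) 0))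
    match st.2 with
    | some l =>
        if PySem.List.slice out (some (l + 2)) none = PySem.List.slice iValues (some 2) none ∧
           PySem.Int.band (PySem.List.pyGetD out l 0) (Int.not TF) =
             PySem.Int.band (PySem.List.pyGetD m index 0) (Int.not TF) then
          (PySem.List.pySetD out l (PySem.Int.bor (PySem.List.pyGetD out l 0)
            (PySem.Int.band (PySem.List.pyGetD m index 0) TF)), st.2)
        else (out ++ iValues, some (out.length : Int))
    | none => (out ++ iValues, some (out.length : Int))

def TranslateCleanupCaseMap_py (values : List Int) (foldFlag : Int) (lowerFlag : Int) (upperFlag : Int) (titleFlag : Int) (nullCondition : Int) (valueMask : Int) : List Int :=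
  if values.length = 1 then values
  else
    let indices := pvAIndices values values.length [0]
    let st2 := (PySem.List.pyRange ((indices.length : Int) - 1) (-1) (-1)).foldl
      (pvA2Body foldFlag lowerFlag upperFlag titleFlag nullCondition valueMask indices)
      (values, some [0], some [0], some [0], some [0])
    let TF := PySem.Int.bor (PySem.Int.bor (PySem.Int.bor foldFlag lowerFlag) upperFlag) titleFlag
    (indices.foldl (pvA3Body TF st2.1) ([], none)).1

-- ===== PORT B =====
-- B-side helpers: literal transliteration of Source B (parse once, reverse default pass,
-- forward accumulated-clear-mask pass).  fuel makes the parse loop total; under Pre_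
-- every iteration consumes at least two elements, so fuel = len(values) suffices.
def pvBParse : Nat → List Int → List (Int × Int × List Int)
  | _, [] => []
  | 0, _ :: _ => []          -- fuel guard (the Python loop diverges only outside Pre_)
  | _+1, [_] => []           -- 'rest[1]' raises IndexError here; outside Pre_
  | fuel+1, f :: c :: tl =>
      (f, c, PySem.List.slice (f :: c :: tl) (some 2) (some (2 + c))) ::
        pvBParse fuel (PySem.List.slice (f :: c :: tl) (some (2 + c)) none)

-- 'for fd in defs: if (flags & fd[0]) != 0 and vals == fd[1]: flags ^= fd[0]'
def pvBStep1 (defs : List (Int × Option (List Int))) (flags : Int) (vals : List Int) : Int :=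
  defs.foldl (fun fl fd =>
    if PySem.Int.band fl fd.1 ≠ 0 ∧ fd.2 = some vals then PySem.Int.bxor fl fd.1 else fl) flags

-- 'for fd in defs: if (flags & fd[0]) != 0: fd[1] = vals if isNull else None'
def pvBDefs (defs : List (Int × Option (List Int))) (flags : Int) (vals : List Int) (isNull : Bool) :
    List (Int × Option (List Int)) :=
  defs.map (fun fd => if PySem.Int.band flags fd.1 ≠ 0 then (fd.1, if isNull then some vals else none) else fd)

-- the body of 'for flags, cnt, vals in reversed(entries)'
def pvBRevBody (nullCondition valueMask : Int)
    (st : List (Int × Int × List Int × Bool) × List (Int × Option (List Int)))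
    (e : Int × Int × List Int) :
    List (Int × Int × List Int × Bool) × List (Int × Option (List Int)) :=
  let fl := pvBStep1 st.2 e.1 e.2.2
  let isNull := PySem.Int.band fl valueMask == nullCondition
  (st.1 ++ [(fl, e.2.1, e.2.2, isNull)], pvBDefs st.2 fl e.2.2 isNull)

-- the body of 'for flags, cnt, vals, isNull in processed'
def pvBFwdBody (TF : Int) (st : List Int × Option Int × Int) (p : Int × Int × List Int × Bool) :
    List Int × Option Int × Int :=
  let out := st.1
  let final := PySem.Int.band p.1 (Int.not st.2.2)
  let clear := if p.2.2.2 then PySem.Int.bor st.2.2 (PySem.Int.band p.1 TF) else st.2.2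
  if PySem.Int.band final TF = 0 then (out, st.2.1, clear)
  else
    match st.2.1 with
    | some l =>
        if PySem.List.slice out (some (l + 2)) none = p.2.2.1 ∧
           PySem.Int.band (PySem.List.pyGetD out l 0) (Int.not TF) = PySem.Int.band final (Int.not TF) then
          (PySem.List.pySetD out l (PySem.Int.bor (PySem.List.pyGetD out l 0) (PySem.Int.band final TF)),
            st.2.1, clear)
        else (out ++ final :: p.2.1 :: p.2.2.1, some (out.length : Int), clear)
    | none => (out ++ final :: p.2.1 :: p.2.2.1, some (out.length : Int), clear)

def TranslateCleanupCaseMap_py_alt (values : List Int) (foldFlag : Int) (lowerFlag : Int) (upperFlag : Int) (titleFlag : Int) (nullCondition : Int) (valueMask : Int) : List Int :=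
  if values.length = 1 then values
  else
    let TF := PySem.Int.bor (PySem.Int.bor (PySem.Int.bor foldFlag lowerFlag) upperFlag) titleFlag
    let entries := pvBParse values.length values
    let rev := entries.reverse.foldl (pvBRevBody nullCondition valueMask)
      ([], [(foldFlag, some [0]), (lowerFlag, some [0]), (upperFlag, some [0]), (titleFlag, some [0])])
    let processed := rev.1.reverse
    (processed.foldl (pvBFwdBody TF) ([], none, 0)).1

-- ===== PRECONDITION & SPEC =====
-- Pre_ restricts to the natural domain of the function: non-empty, well-formed packed
-- tables (a single value, or a sequence of [flags, count>=0, count values] blocks tiling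
-- the list, the last count possibly reaching past the end).  On malformed tables A
-- raises IndexError, diverges, or wraps around via Python negative indexing.
def pvWFgo : Nat → List Int → Bool
  | _, [] => true
  | 0, _ => false                 -- never reached when the fuel is at least the length
  | _ + 1, [_] => false
  | fuel + 1, _ :: c :: rest => (0 ≤ c) && pvWFgo fuel (rest.drop c.toNat)

def pvWF (l : List Int) : Bool := pvWFgo l.length l

def Pre_TranslateCleanupCaseMap_py (values : List Int) (foldFlag : Int) (lowerFlag : Int) (upperFlag : Int) (titleFlag : Int) (nullCondition : Int) (valueMask : Int) : Prop :=
  values ≠ [] ∧ (values.length = 1 ∨ pvWF values = true)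
instance (values : List Int) (foldFlag : Int) (lowerFlag : Int) (upperFlag : Int) (titleFlag : Int) (nullCondition : Int) (valueMask : Int) : Decidable (Pre_TranslateCleanupCaseMap_py values foldFlag lowerFlag upperFlag titleFlag nullCondition valueMask) := by unfold Pre_TranslateCleanupCaseMap_py; infer_instance

def pvWitness_TranslateCleanupCaseMap_py : List Int × Int × Int × Int × Int × Int × Int :=
  ([3, 1, 5, 1, 0], 1, 2, 4, 8, 0, 48)

def Spec_TranslateCleanupCaseMap_py (values : List Int) (foldFlag : Int) (lowerFlag : Int) (upperFlag : Int) (titleFlag : Int) (nullCondition : Int) (valueMask : Int) (out : List Int) : Prop := out = TranslateCleanupCaseMap_py_alt values foldFlag lowerFlag upperFlag titleFlag nullCondition valueMask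
instance (values : List Int) (foldFlag : Int) (lowerFlag : Int) (upperFlag : Int) (titleFlag : Int) (nullCondition : Int) (valueMask : Int) (out : List Int) : Decidable (Spec_TranslateCleanupCaseMap_py values foldFlag lowerFlag upperFlag titleFlag nullCondition valueMask out) := by unfold Spec_TranslateCleanupCaseMap_py; infer_instance

-- ===== CLAIM (what is proved, stated in full; the proofs are below) =====
def Claim_equal_TranslateCleanupCaseMap_py : Prop := ∀ (values : List Int) (foldFlag : Int) (lowerFlag : Int) (upperFlag : Int) (titleFlag : Int) (nullCondition : Int) (valueMask : Int), Dom_TranslateCleanupCaseMap_py values foldFlag lowerFlag upperFlag titleFlag nullCondition valueMask → Pre_TranslateCleanupCaseMap_py values foldFlag lowerFlag upperFlag titleFlag nullCondition valueMask → Spec_TranslateCleanupCaseMap_py values foldFlag lowerFlag upperFlag titleFlag nullCondition valueMask (TranslateCleanupCaseMap_py values foldFlag lowerFlag upperFlag titleFlag nullCondition valueMask)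

-- ===== LEMMAS AND PROOFS =====



theorem pvOrAddAnd : ∀ (a b : Nat), (a ||| b) + (a &&& b) = a + b := by
  intro a
  induction a using Nat.strong_induction_on with
  | _ a ih =>
    intro b
    rcases Nat.eq_zero_or_pos a with h | h
    · simp [h]
    · have h2 : (a / 2 ||| b / 2) + (a / 2 &&& b / 2) = a / 2 + b / 2 := ih (a / 2) (by omega) (b / 2)
      have ho : (a ||| b) / 2 = a / 2 ||| b / 2 := Nat.or_div_two
      have ha : (a &&& b) / 2 = a / 2 &&& b / 2 := Nat.and_div_two
      have mo : (a ||| b) % 2 = 1 ↔ a % 2 = 1 ∨ b % 2 = 1 := Nat.or_mod_two_eq_one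
      have ma : (a &&& b) % 2 = 1 ↔ a % 2 = 1 ∧ b % 2 = 1 := Nat.and_mod_two_eq_one
      have e1 : a ||| b = 2 * ((a ||| b) / 2) + (a ||| b) % 2 := by omega
      have e2 : a &&& b = 2 * ((a &&& b) / 2) + (a &&& b) % 2 := by omega
      omega

theorem pvSubAndLdiff (m n : Nat) : m - (m &&& n) = m.ldiff n := by
  have h1 : (m &&& n) ||| m.ldiff n = m := by
    apply Nat.eq_of_testBit_eq
    intro i
    simp [Nat.testBit_or, Nat.testBit_and, Nat.testBit_ldiff]
    cases m.testBit i <;> cases n.testBit i <;> simp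
  have h2 : (m &&& n) &&& m.ldiff n = 0 := by
    apply Nat.eq_of_testBit_eq
    intro i
    simp [Nat.testBit_and, Nat.testBit_ldiff]
    cases m.testBit i <;> cases n.testBit i <;> simp
  have := pvOrAddAnd (m &&& n) (m.ldiff n)
  omega

theorem pvBandEq (a b : Int) : PySem.Int.band a b = Int.land a b := by
  unfold PySem.Int.band
  cases a with
  | ofNat m =>
    cases b with
    | ofNat n => simp [Int.land]
    | negSucc n => simp [Int.land]; exact pvSubAndLdiff m n
  | negSucc m =>
    cases b with
    | ofNat n => simp [Int.land]; exact pvSubAndLdiff n m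
    | negSucc n => simp [Int.land]; omega

theorem pvBorEq (a b : Int) : PySem.Int.bor a b = Int.lor a b := by
  unfold PySem.Int.bor
  cases a with
  | ofNat m =>
    cases b with
    | ofNat n => simp [Int.lor]
    | negSucc n => simp [Int.lor]; rw [← pvSubAndLdiff n m, Nat.and_comm]; omega
  | negSucc m =>
    cases b with
    | ofNat n => simp [Int.lor]; rw [← pvSubAndLdiff m n, Nat.and_comm]; omega
    | negSucc n => simp [Int.lor]; omega

theorem pvNotEq (a : Int) : Int.not a = Int.lnot a := by
  cases a <;> rfl

theorem pvIntExt {a b : Int} (h : ∀ i, a.testBit i = b.testBit i) : a = b := by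
  cases a with
  | ofNat m =>
    cases b with
    | ofNat n =>
      have : m = n := Nat.eq_of_testBit_eq (fun i => by
        have := h i; simpa [Int.testBit] using this)
      simp [this]
    | negSucc n =>
      exfalso
      have hk := h (max m n)
      have h1 : m.testBit (max m n) = false := Nat.testBit_lt_two_pow (lt_of_le_of_lt (Nat.le_max_left m n) (Nat.lt_two_pow_self))
      have h2 : n.testBit (max m n) = false := Nat.testBit_lt_two_pow (lt_of_le_of_lt (Nat.le_max_right m n) (Nat.lt_two_pow_self))
      simp [Int.testBit, h1, h2] at hk
  | negSucc m =>
    cases b with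
    | ofNat n =>
      exfalso
      have hk := h (max m n)
      have h1 : m.testBit (max m n) = false := Nat.testBit_lt_two_pow (lt_of_le_of_lt (Nat.le_max_left m n) (Nat.lt_two_pow_self))
      have h2 : n.testBit (max m n) = false := Nat.testBit_lt_two_pow (lt_of_le_of_lt (Nat.le_max_right m n) (Nat.lt_two_pow_self))
      simp [Int.testBit, h1, h2] at hk
    | negSucc n =>
      have : m = n := Nat.eq_of_testBit_eq (fun i => by
        have := h i; simpa [Int.testBit] using this)
      simp [this]

theorem pvDeMorgan (x a k : Int) :
    PySem.Int.band (PySem.Int.band x (Int.not a)) (Int.not k) =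
    PySem.Int.band x (Int.not (PySem.Int.bor a k)) := by
  simp only [pvBandEq, pvBorEq, pvNotEq]
  apply pvIntExt
  intro i
  simp [Int.testBit_land, Int.testBit_lnot, Int.testBit_lor]
  cases x.testBit i <;> cases a.testBit i <;> cases k.testBit i <;> simp

theorem pvBorRotate (c m k : Int) :
    PySem.Int.bor (PySem.Int.bor c m) k = PySem.Int.bor (PySem.Int.bor c k) m := by
  simp only [pvBorEq]
  apply pvIntExt
  intro i
  simp [Int.testBit_lor]
  cases c.testBit i <;> cases m.testBit i <;> cases k.testBit i <;> simp

theorem pvBandNotZero (x : Int) : PySem.Int.band x (Int.not 0) = x := by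
  have : Int.not 0 = -1 := rfl
  rw [this]
  exact PySem.Int.band_neg_one x
-- fuel irrelevance for the well-formedness check
theorem pvWFgo_fuel : ∀ (f1 : Nat) (l : List Int) (f2 : Nat), l.length ≤ f1 → l.length ≤ f2 →
    pvWFgo f1 l = pvWFgo f2 l := by
  intro f1
  induction f1 with
  | zero =>
    intro l f2 h1 _
    match l, h1 with
    | [], _ => cases f2 <;> rfl
  | succ f ih =>
    intro l f2 h1 h2
    match l, h1, h2 with
    | [], _, _ => cases f2 <;> rfl
    | [x], _, h2 =>
      match f2, h2 with
      | f2 + 1, _ => rfl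
    | x :: c :: rest, h1, h2 =>
      match f2, h2 with
      | f2 + 1, h2 =>
        simp only [pvWFgo]
        congr 1
        apply ih
        · simp at h1 ⊢; omega
        · simp at h2 ⊢; omega

theorem pvWF_cons (f c : Int) (rest : List Int) :
    pvWF (f :: c :: rest) = ((0 ≤ c : Bool) && pvWF (rest.drop c.toNat)) := by
  show pvWFgo (f :: c :: rest).length (f :: c :: rest) = _
  simp only [List.length_cons, pvWFgo]
  congr 1
  apply pvWFgo_fuel
  · simp; omega
  · rfl
-- proof-side: the entry decomposition of a well-formed table
def pvEnts : List Int → List (Int × Int × List Int)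
  | [] => []
  | [_] => []
  | f :: c :: rest => (f, c, rest.take c.toNat) :: pvEnts (rest.drop c.toNat)
termination_by l => l.length
decreasing_by simp; omega

def pvBlock (e : Int × Int × List Int) : List Int := e.1 :: e.2.1 :: e.2.2

def pvFlat (es : List (Int × Int × List Int)) : List Int := (es.map pvBlock).flatten

-- per-entry shape facts used to read the flat list back entry by entry
def pvGood : List (Int × Int × List Int) → Prop
  | [] => True
  | e :: es => 0 ≤ e.2.1 ∧ e.2.2.length ≤ e.2.1.toNat ∧ (e.2.2.length < e.2.1.toNat → es = []) ∧ pvGood es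

theorem pvWF_flat : ∀ values : List Int, pvWF values = true → pvFlat (pvEnts values) = values := by
  intro values
  induction values using pvEnts.induct with
  | case1 => intro _; simp [pvEnts, pvFlat]
  | case2 x => intro h; simp [pvWF, pvWFgo] at h
  | case3 f c rest ih =>
    intro h
    rw [pvWF_cons] at h
    simp at h
    rw [pvEnts]
    simp [pvFlat, pvBlock] at ih ⊢
    rw [ih h.2]
    simp

theorem pvWF_good : ∀ values : List Int, pvWF values = true → pvGood (pvEnts values) := by
  intro values
  induction values using pvEnts.induct with
  | case1 => intro _; simp [pvEnts]; trivial
  | case2 x => intro h; simp [pvWF, pvWFgo] at h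
  | case3 f c rest ih =>
    intro h
    rw [pvWF_cons] at h
    simp at h
    rw [pvEnts]
    refine ⟨h.1, by simp, ?_, ih h.2⟩
    intro hlt
    simp at hlt
    have : rest.length ≤ c.toNat := by omega
    have hd : rest.drop c.toNat = [] := by
      apply List.drop_eq_nil_of_le this
    rw [hd]
    simp [pvEnts]

theorem pvFlat_len_ge (es : List (Int × Int × List Int)) : 2 * es.length ≤ (pvFlat es).length := by
  induction es with
  | nil => simp [pvFlat]
  | cons e es ih => simp [pvFlat, pvBlock] at ih ⊢; omega
theorem pvSliceTake (f c : Int) (tl : List Int) (hc : 0 ≤ c) :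
    PySem.List.slice (f :: c :: tl) (some 2) (some (2 + c)) = tl.take c.toNat := by
  rw [PySem.List.slice_toNat _ (by omega) (by omega)]
  have h2 : (2 : Int).toNat = 2 := rfl
  have h3 : (2 + c).toNat = 2 + c.toNat := by omega
  rw [h2, h3]
  simp

theorem pvSliceDrop (f c : Int) (tl : List Int) (hc : 0 ≤ c) :
    PySem.List.slice (f :: c :: tl) (some (2 + c)) none = tl.drop c.toNat := by
  rw [PySem.List.slice_from _ (by omega)]
  have h3 : (2 + c).toNat = c.toNat + 1 + 1 := by omega
  rw [h3]
  simp [List.drop_succ_cons]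

theorem pvParse_eq : ∀ (fuel : Nat) (values : List Int), pvWF values = true →
    values.length ≤ 2 * fuel + 1 → pvBParse fuel values = pvEnts values := by
  intro fuel
  induction fuel with
  | zero =>
    intro values hwf hlen
    match values, hwf, hlen with
    | [], _, _ => simp [pvBParse, pvEnts]
    | [x], hwf, _ => simp [pvWF, pvWFgo] at hwf
    | x :: y :: t, _, hlen => simp at hlen
  | succ F ih =>
    intro values hwf hlen
    match values, hwf, hlen with
    | [], _, _ => simp [pvBParse, pvEnts]
    | [x], hwf, _ => simp [pvWF, pvWFgo] at hwf
    | f :: c :: tl, hwf, hlen =>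
      rw [pvWF_cons] at hwf
      simp at hwf
      rw [pvBParse, pvEnts, pvSliceTake f c tl hwf.1, pvSliceDrop f c tl hwf.1]
      congr 1
      apply ih _ hwf.2
      simp at hlen ⊢
      omega

def pvStarts (o : Int) : List (Int × Int × List Int) → List Int
  | [] => []
  | e :: es => o :: pvStarts (o + 2 + e.2.2.length) es

theorem pvRead (P r : List Int) (k : Nat) (d : Int) :
    PySem.List.pyGetD (P ++ r) ((P.length : Int) + (k : Int)) d = r.getD k d := by
  have : (P.length : Int) + (k : Int) = ((P.length + k : Nat) : Int) := by push_cast; ring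
  rw [this, PySem.List.pyGetD_natCast]
  rw [List.getD_append_right P r d (P.length + k) (by omega)]
  congr 1
  omega

theorem pvRead0 (P r : List Int) (d : Int) :
    PySem.List.pyGetD (P ++ r) ((P.length : Int)) d = r.getD 0 d := by
  have := pvRead P r 0 d
  simpa using this

theorem pvAIndices_go : ∀ (es : List (Int × Int × List Int)) (P idxs : List Int) (fuel : Nat),
    pvGood es → es ≠ [] → PySem.List.pyGetD idxs (-1) 0 = (P.length : Int) →
    es.length ≤ fuel + 1 →
    pvAIndices (P ++ pvFlat es) fuel idxs = idxs ++ (pvStarts (P.length : Int) es).tail := by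
  intro es
  induction es with
  | nil => intro _ _ _ _ hne; exact absurd rfl hne
  | cons e es ihs =>
    intro P idxs fuel hg _ hlast hfuel
    obtain ⟨f, c, vs⟩ := e
    obtain ⟨hc0, hle0, hlt0, hg'⟩ := hg
    have hc : 0 ≤ c := hc0
    have hle : vs.length ≤ c.toNat := hle0
    have hlt : vs.length < c.toNat → es = [] := hlt0
    cases es with
    | nil =>
      -- single entry: the very next step breaks (or fuel is 0 and the result is the same)
      have hres : (pvStarts (P.length : Int) [(f, c, vs)]).tail = [] := rfl
      rw [hres, List.append_nil]
      cases fuel with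
      | zero => rfl
      | succ F =>
        rw [pvAIndices]
        simp only [hlast]
        have hflat : pvFlat [(f, c, vs)] = f :: c :: vs := by simp [pvFlat, pvBlock]
        rw [hflat]
        have hread : PySem.List.pyGetD (P ++ f :: c :: vs) ((P.length : Int) + 1) 0 = c := by
          have := pvRead P (f :: c :: vs) 1 0
          simpa using this
        rw [hread]
        have hle' : vs.length ≤ c.toNat := by simpa using hle
        have hbreak : ((P ++ f :: c :: vs).length : Int) ≤ (P.length : Int) + c + 2 := by
          simp only [List.length_append, List.length_cons]
          push_cast
          omega
        rw [if_pos hbreak]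
    | cons e' es' =>
      have hEq : vs.length = c.toNat := by
        rcases Nat.lt_or_ge vs.length c.toNat with h | h
        · exact absurd (hlt h) (by simp)
        · omega
      cases fuel with
      | zero => simp at hfuel
      | succ F =>
        rw [pvAIndices]
        simp only [hlast]
        have hflat : P ++ pvFlat ((f, c, vs) :: e' :: es') = (P ++ f :: c :: vs) ++ pvFlat (e' :: es') := by
          simp [pvFlat, pvBlock]
        rw [hflat]
        have hread : PySem.List.pyGetD ((P ++ f :: c :: vs) ++ pvFlat (e' :: es')) ((P.length : Int) + 1) 0 = c := by
          have : (P ++ f :: c :: vs) ++ pvFlat (e' :: es') = P ++ (f :: c :: vs ++ pvFlat (e' :: es')) := by simp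
          rw [this]
          have := pvRead P (f :: c :: vs ++ pvFlat (e' :: es')) 1 0
          simpa using this
        rw [hread]
        have hle' : vs.length ≤ c.toNat := by simpa using hle
        have hEq' : vs.length = c.toNat := by simpa using hEq
        have hlen2 : 2 ≤ (pvFlat (e' :: es')).length := by
          have := pvFlat_len_ge (e' :: es')
          simp at this
          omega
        have hnobreak : ¬ (((P ++ f :: c :: vs) ++ pvFlat (e' :: es')).length : Int) ≤ (P.length : Int) + c + 2 := by
          simp only [List.length_append, List.length_cons, not_le]
          push_cast
          omega
        simp only [if_neg hnobreak]
        have hP' : (P.length : Int) + c + 2 = (((P ++ f :: c :: vs).length : Nat) : Int) := by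
          simp only [List.length_append, List.length_cons]
          push_cast
          omega
        rw [hP']
        rw [ihs (P ++ f :: c :: vs) (idxs ++ [(((P ++ f :: c :: vs).length : Nat) : Int)]) F hg' (by simp)
          (PySem.List.pyGetD_neg_one_append_singleton _ _ _) (by simp at hfuel ⊢; omega)]
        have hstarts : pvStarts ((P.length : Nat) : Int) ((f, c, vs) :: e' :: es')
            = ((P.length : Nat) : Int) :: (((P ++ f :: c :: vs).length : Nat) : Int) :: (pvStarts (((P ++ f :: c :: vs).length : Nat) : Int) (e' :: es')).tail := by
          rw [pvStarts]
          congr 1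
          have : ((P.length : Int) + 2 + (vs.length : Int)) = (((P ++ f :: c :: vs).length : Nat) : Int) := by
            simp only [List.length_append, List.length_cons]; push_cast; omega
          rw [this, pvStarts]
          simp [List.tail_cons]
        rw [hstarts]
        simp
-- entry-level form of B's reverse pass (head entry processed last, like reversed())
def pvProc (nullCondition valueMask : Int) :
    List (Int × Int × List Int) → List (Int × Option (List Int)) →
    List (Int × Int × List Int × Bool) × List (Int × Option (List Int))
  | [], d => ([], d)
  | e :: es, d =>
      let r := pvProc nullCondition valueMask es d
      let fl := pvBStep1 r.2 e.1 e.2.2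
      let nl := PySem.Int.band fl valueMask == nullCondition
      ((fl, e.2.1, e.2.2, nl) :: r.1, pvBDefs r.2 fl e.2.2 nl)

theorem pvRev_eq (nc vm : Int) : ∀ (es : List (Int × Int × List Int))
    (acc : List (Int × Int × List Int × Bool)) (d : List (Int × Option (List Int))),
    es.reverse.foldl (pvBRevBody nc vm) (acc, d) =
      (acc ++ (pvProc nc vm es d).1.reverse, (pvProc nc vm es d).2) := by
  intro es
  induction es with
  | nil => intro acc d; simp [pvProc]
  | cons e es ih =>
    intro acc d
    rw [List.reverse_cons, List.foldl_append, ih]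
    simp [pvBRevBody, pvProc]

-- the final flags after A's in-place clearing, expressed with B's accumulated clear mask
def pvMask (TF : Int) : List (Int × Int × List Int × Bool) → Int → List (Int × Int × List Int)
  | [], _ => []
  | p :: ps, clear =>
      (PySem.Int.band p.1 (Int.not clear), p.2.1, p.2.2.1) ::
        pvMask TF ps (if p.2.2.2 = true then PySem.Int.bor clear (PySem.Int.band p.1 TF) else clear)

theorem pvMask_map (TF : Int) : ∀ (ps : List (Int × Int × List Int × Bool)) (c K : Int),
    (pvMask TF ps c).map (fun e => (PySem.Int.band e.1 (Int.not K), e.2.1, e.2.2)) =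
      pvMask TF ps (PySem.Int.bor c K) := by
  intro ps
  induction ps with
  | nil => intro c K; simp [pvMask]
  | cons p ps ih =>
    intro c K
    simp only [pvMask, List.map_cons]
    refine congrArg₂ _ (by simp [pvDeMorgan]) ?_
    rw [ih]
    by_cases h : p.2.2.2 = true
    · simp only [h, if_true, pvBorRotate]
    · simp only [h]
      simp

def pvGoodQ : List (Int × Int × List Int × Bool) → Prop
  | [] => True
  | p :: ps => 0 ≤ p.2.1 ∧ p.2.2.1.length ≤ p.2.1.toNat ∧ (p.2.2.1.length < p.2.1.toNat → ps = []) ∧ pvGoodQ ps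

theorem pvProc_good (nc vm : Int) : ∀ es d, pvGood es → pvGoodQ (pvProc nc vm es d).1 := by
  intro es
  induction es with
  | nil => intro d _; simp [pvProc]; trivial
  | cons e es ih =>
    intro d hg
    obtain ⟨h1, h2, h3, h4⟩ := hg
    simp only [pvProc]
    refine ⟨h1, h2, ?_, ih d h4⟩
    intro hlt
    have : es = [] := h3 hlt
    subst this
    simp [pvProc]

def pvStartsQ (o : Int) : List (Int × Int × List Int × Bool) → List Int
  | [] => []
  | p :: ps => o :: pvStartsQ (o + 2 + p.2.2.1.length) ps

theorem pvMask_starts (TF : Int) : ∀ ps (c o : Int), pvStarts o (pvMask TF ps c) = pvStartsQ o ps := by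
  intro ps
  induction ps with
  | nil => intro c o; simp [pvMask, pvStarts, pvStartsQ]
  | cons p ps ih => intro c o; simp only [pvMask, pvStarts, pvStartsQ, ih]

theorem pvProc_starts (nc vm : Int) : ∀ es d (o : Int), pvStartsQ o (pvProc nc vm es d).1 = pvStarts o es := by
  intro es
  induction es with
  | nil => intro d o; simp [pvProc, pvStartsQ, pvStarts]
  | cons e es ih => intro d o; simp only [pvProc, pvStartsQ, pvStarts, ih]

theorem pvProc_defs_shape (nc vm fF lF uF tF : Int) : ∀ es (a b c d : Option (List Int)),
    ∃ a' b' c' d', (pvProc nc vm es [(fF, a), (lF, b), (uF, c), (tF, d)]).2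
      = [(fF, a'), (lF, b'), (uF, c'), (tF, d')] := by
  intro es
  induction es with
  | nil => intro a b c d; exact ⟨a, b, c, d, rfl⟩
  | cons e es ih =>
    intro a b c d
    obtain ⟨a', b', c', d', hR⟩ := ih a b c d
    simp only [pvProc, hR, pvBDefs, List.map_cons, List.map_nil]
    by_cases h1 : PySem.Int.band (pvBStep1 [(fF, a'), (lF, b'), (uF, c'), (tF, d')] e.1 e.2.2) fF ≠ 0 <;>
      by_cases h2 : PySem.Int.band (pvBStep1 [(fF, a'), (lF, b'), (uF, c'), (tF, d')] e.1 e.2.2) lF ≠ 0 <;>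
        by_cases h3 : PySem.Int.band (pvBStep1 [(fF, a'), (lF, b'), (uF, c'), (tF, d')] e.1 e.2.2) uF ≠ 0 <;>
          by_cases h4 : PySem.Int.band (pvBStep1 [(fF, a'), (lF, b'), (uF, c'), (tF, d')] e.1 e.2.2) tF ≠ 0 <;>
            simp [h1, h2, h3, h4]
-- flat-list read/write helpers at an entry start ↑P.length
theorem pvReadFlag (P r : List Int) (g d : Int) :
    PySem.List.pyGetD (P ++ g :: r) ((P.length : Int)) d = g := by
  rw [pvRead0]; simp

theorem pvReadCnt (P r : List Int) (g c d : Int) :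
    PySem.List.pyGetD (P ++ g :: c :: r) ((P.length : Int) + 1) d = c := by
  have := pvRead P (g :: c :: r) 1 d
  simpa using this

theorem pvReadPre (Q r : List Int) (s d : Int) (hs : 0 ≤ s) (hlt : s.toNat < Q.length) :
    PySem.List.pyGetD (Q ++ r) s d = Q.getD s.toNat d := by
  have hcast : s = ((s.toNat : Nat) : Int) := by omega
  nth_rewrite 1 [hcast]
  rw [PySem.List.pyGetD_natCast, List.getD_append _ _ _ _ hlt]

theorem pvWriteFlag (P r : List Int) (v : Int) :
    PySem.List.pySetD (P ++ r) ((P.length : Int)) v = P ++ r.set 0 v := by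
  have : ((P.length : Nat) : Int) = ((P.length : Nat) : Int) := rfl
  rw [show ((P.length : Int)) = ((P.length : Nat) : Int) from rfl, PySem.List.pySetD_natCast]
  rw [List.set_append_right _ _ (le_refl _)]
  simp

theorem pvDropMid (P r : List Int) (k : Nat) : (P ++ r).drop (P.length + k) = r.drop k := by
  rw [List.drop_append]
  simp

theorem pvSliceVals (P : List Int) (g c : Int) (r : List Int) (hc : 0 ≤ c) :
    PySem.List.slice (P ++ g :: c :: r) (some ((P.length : Int) + 2)) (some ((P.length : Int) + 2 + c))
      = r.take c.toNat := by
  rw [PySem.List.slice_toNat _ (by omega) (by omega)]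
  have h2 : ((P.length : Int) + 2 + c).toNat - ((P.length : Int) + 2).toNat = c.toNat := by omega
  have h1 : ((P.length : Int) + 2).toNat = P.length + 2 := by omega
  rw [h2, h1]
  have : (P ++ g :: c :: r).drop (P.length + 2) = r := by
    have := pvDropMid P (g :: c :: r) 2
    simpa using this
  rw [this]

theorem pvSliceBlock (P : List Int) (g c : Int) (r : List Int) (hc : 0 ≤ c) :
    PySem.List.slice (P ++ g :: c :: r) (some ((P.length : Int))) (some ((P.length : Int) + 2 + c))
      = g :: c :: r.take c.toNat := by
  rw [PySem.List.slice_toNat _ (by omega) (by omega)]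
  have h2 : ((P.length : Int) + 2 + c).toNat - ((P.length : Int)).toNat = 2 + c.toNat := by omega
  have h1 : ((P.length : Int)).toNat = P.length := by omega
  rw [h2, h1]
  have hd : (P ++ g :: c :: r).drop P.length = g :: c :: r := by
    have := pvDropMid P (g :: c :: r) 0
    simpa using this
  rw [hd]
  have : 2 + c.toNat = c.toNat + 1 + 1 := by omega
  rw [this]
  simp

theorem pvTakeVs (vs T : List Int) (c : Int) (hle : vs.length ≤ c.toNat)
    (h : vs.length < c.toNat → T = []) : (vs ++ T).take c.toNat = vs := by
  rcases Nat.lt_or_ge vs.length c.toNat with hlt | hge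
  · rw [h hlt]
    simp
    omega
  · have : c.toNat = vs.length := by omega
    rw [this]
    simp

-- the inner clearing loop of a null condition, entry level
theorem pvClear_go (TF s : Int) (hs : 0 ≤ s) :
    ∀ (M : List (Int × Int × List Int)) (Q : List Int), s.toNat < Q.length →
    (pvStarts ((Q.length : Nat) : Int) M).foldl
      (fun m pj => PySem.List.pySetD m pj (PySem.Int.band (PySem.List.pyGetD m pj 0)
        (Int.not (PySem.Int.band (PySem.List.pyGetD m s 0) TF)))) (Q ++ pvFlat M)
    = Q ++ pvFlat (M.map (fun e =>
        (PySem.Int.band e.1 (Int.not (PySem.Int.band (Q.getD s.toNat 0) TF)), e.2.1, e.2.2))) := by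
  intro M
  induction M with
  | nil => intro Q _; simp [pvStarts, pvFlat]
  | cons e M ih =>
    intro Q hlt
    obtain ⟨g, c, vs⟩ := e
    have hflat : Q ++ pvFlat ((g, c, vs) :: M) = Q ++ (g :: c :: vs) ++ pvFlat M := by
      simp [pvFlat, pvBlock]
    rw [pvStarts, List.foldl_cons, hflat]
    have hread : PySem.List.pyGetD (Q ++ (g :: c :: vs) ++ pvFlat M) ((Q.length : Int)) 0 = g := by
      have : Q ++ (g :: c :: vs) ++ pvFlat M = Q ++ (g :: (c :: vs ++ pvFlat M)) := by simp
      rw [this, pvReadFlag]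
    have hreads : PySem.List.pyGetD (Q ++ (g :: c :: vs) ++ pvFlat M) s 0 = Q.getD s.toNat 0 := by
      have : Q ++ (g :: c :: vs) ++ pvFlat M = Q ++ (g :: c :: vs ++ pvFlat M) := by simp
      rw [this, pvReadPre _ _ _ _ hs hlt]
    rw [hread, hreads]
    set g' := PySem.Int.band g (Int.not (PySem.Int.band (Q.getD s.toNat 0) TF)) with hg'
    have hwrite : PySem.List.pySetD (Q ++ (g :: c :: vs) ++ pvFlat M) ((Q.length : Int)) g'
        = (Q ++ (g' :: c :: vs)) ++ pvFlat M := by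
      have : Q ++ (g :: c :: vs) ++ pvFlat M = Q ++ (g :: (c :: vs ++ pvFlat M)) := by simp
      rw [this, pvWriteFlag]
      simp
    rw [hwrite]
    have hlen : ((Q.length : Int) + 2 + (vs.length : Int)) = (((Q ++ g' :: c :: vs).length : Nat) : Int) := by
      simp only [List.length_append, List.length_cons]
      push_cast
      ring
    rw [hlen, ih (Q ++ g' :: c :: vs) (by simp; omega)]
    have hgd : (Q ++ g' :: c :: vs).getD s.toNat 0 = Q.getD s.toNat 0 :=
      List.getD_append _ _ _ _ hlt
    rw [hgd]
    simp [pvFlat, pvBlock, g', List.getD]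
def pvTF4 (f l u t : Int) : Int := PySem.Int.bor (PySem.Int.bor (PySem.Int.bor f l) u) t

def pvDTup (L : List (Int × Option (List Int))) :
    Option (List Int) × Option (List Int) × Option (List Int) × Option (List Int) :=
  ((L.getD 0 (0, none)).2, (L.getD 1 (0, none)).2, (L.getD 2 (0, none)).2, (L.getD 3 (0, none)).2)

theorem pvGetAtDrop (I : List Int) (t : Nat) (x : Int) (xs : List Int) (h : I.drop t = x :: xs) :
    PySem.List.pyGetD I (t : Int) 0 = x := by
  rw [PySem.List.pyGetD_natCast]
  have h0 : I[t]? = some x := by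
    have : (List.drop t I)[0]? = I[t + 0]? := List.getElem?_drop
    rw [h] at this
    simpa using this.symm
  simp [List.getD, h0]

theorem pvAFlag1_eq (P : List Int) (g : Int) (r iv : List Int) (f : Int) (dopt : Option (List Int)) :
    pvAFlag1 (P ++ g :: r) ((P.length : Int)) iv f dopt
      = P ++ (if PySem.Int.band g f ≠ 0 ∧ dopt = some iv then PySem.Int.bxor g f else g) :: r := by
  unfold pvAFlag1
  rw [pvReadFlag]
  split_ifs with h
  · rw [pvWriteFlag]; simp
  · simp

theorem pvBStep1_lit (fF lF uF tF : Int) (a b c d : Option (List Int)) (g : Int) (vs : List Int) :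
    pvBStep1 [(fF, a), (lF, b), (uF, c), (tF, d)] g vs =
      (if PySem.Int.band
          (if PySem.Int.band
              (if PySem.Int.band
                  (if PySem.Int.band g fF ≠ 0 ∧ a = some vs then PySem.Int.bxor g fF else g) lF ≠ 0 ∧
                    b = some vs then
                PySem.Int.bxor (if PySem.Int.band g fF ≠ 0 ∧ a = some vs then PySem.Int.bxor g fF else g) lF
              else if PySem.Int.band g fF ≠ 0 ∧ a = some vs then PySem.Int.bxor g fF else g) uF ≠ 0 ∧
            c = some vs then
        PySem.Int.bxor
          (if PySem.Int.band
              (if PySem.Int.band g fF ≠ 0 ∧ a = some vs then PySem.Int.bxor g fF else g) lF ≠ 0 ∧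
                b = some vs then
            PySem.Int.bxor (if PySem.Int.band g fF ≠ 0 ∧ a = some vs then PySem.Int.bxor g fF else g) lF
          else if PySem.Int.band g fF ≠ 0 ∧ a = some vs then PySem.Int.bxor g fF else g) uF
      else
        if PySem.Int.band
            (if PySem.Int.band g fF ≠ 0 ∧ a = some vs then PySem.Int.bxor g fF else g) lF ≠ 0 ∧
              b = some vs then
          PySem.Int.bxor (if PySem.Int.band g fF ≠ 0 ∧ a = some vs then PySem.Int.bxor g fF else g) lF
        else if PySem.Int.band g fF ≠ 0 ∧ a = some vs then PySem.Int.bxor g fF else g) tF ≠ 0 ∧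
        d = some vs then
      PySem.Int.bxor
        (if PySem.Int.band
            (if PySem.Int.band
                (if PySem.Int.band g fF ≠ 0 ∧ a = some vs then PySem.Int.bxor g fF else g) lF ≠ 0 ∧
                  b = some vs then
              PySem.Int.bxor (if PySem.Int.band g fF ≠ 0 ∧ a = some vs then PySem.Int.bxor g fF else g) lF
            else if PySem.Int.band g fF ≠ 0 ∧ a = some vs then PySem.Int.bxor g fF else g) uF ≠ 0 ∧
              c = some vs then
          PySem.Int.bxor
            (if PySem.Int.band
                (if PySem.Int.band g fF ≠ 0 ∧ a = some vs then PySem.Int.bxor g fF else g) lF ≠ 0 ∧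
                  b = some vs then
              PySem.Int.bxor (if PySem.Int.band g fF ≠ 0 ∧ a = some vs then PySem.Int.bxor g fF else g) lF
            else if PySem.Int.band g fF ≠ 0 ∧ a = some vs then PySem.Int.bxor g fF else g) uF
        else
          if PySem.Int.band
              (if PySem.Int.band g fF ≠ 0 ∧ a = some vs then PySem.Int.bxor g fF else g) lF ≠ 0 ∧
                b = some vs then
            PySem.Int.bxor (if PySem.Int.band g fF ≠ 0 ∧ a = some vs then PySem.Int.bxor g fF else g) lF
          else if PySem.Int.band g fF ≠ 0 ∧ a = some vs then PySem.Int.bxor g fF else g) tF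
    else
      if PySem.Int.band
          (if PySem.Int.band
              (if PySem.Int.band g fF ≠ 0 ∧ a = some vs then PySem.Int.bxor g fF else g) lF ≠ 0 ∧
                b = some vs then
            PySem.Int.bxor (if PySem.Int.band g fF ≠ 0 ∧ a = some vs then PySem.Int.bxor g fF else g) lF
          else if PySem.Int.band g fF ≠ 0 ∧ a = some vs then PySem.Int.bxor g fF else g) uF ≠ 0 ∧
            c = some vs then
        PySem.Int.bxor
          (if PySem.Int.band
              (if PySem.Int.band g fF ≠ 0 ∧ a = some vs then PySem.Int.bxor g fF else g) lF ≠ 0 ∧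
                b = some vs then
            PySem.Int.bxor (if PySem.Int.band g fF ≠ 0 ∧ a = some vs then PySem.Int.bxor g fF else g) lF
          else if PySem.Int.band g fF ≠ 0 ∧ a = some vs then PySem.Int.bxor g fF else g) uF
      else
        if PySem.Int.band
            (if PySem.Int.band g fF ≠ 0 ∧ a = some vs then PySem.Int.bxor g fF else g) lF ≠ 0 ∧
              b = some vs then
          PySem.Int.bxor (if PySem.Int.band g fF ≠ 0 ∧ a = some vs then PySem.Int.bxor g fF else g) lF
        else if PySem.Int.band g fF ≠ 0 ∧ a = some vs then PySem.Int.bxor g fF else g) := by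
  simp only [pvBStep1, List.foldl_cons, List.foldl_nil]
theorem pvAClear_eq (I Q : List Int) (TF : Int) (t : Nat) (M' : List (Int × Int × List Int)) (s : Int)
    (hs : 0 ≤ s) (hlt : s.toNat < Q.length)
    (hdrop1 : I.drop (t + 1) = pvStarts ((Q.length : Nat) : Int) M') :
    pvAClear I s TF ((t : Nat) : Int) (Q ++ pvFlat M')
      = Q ++ pvFlat (M'.map (fun e =>
          (PySem.Int.band e.1 (Int.not (PySem.Int.band (Q.getD s.toNat 0) TF)), e.2.1, e.2.2))) := by
  unfold pvAClear
  rw [PySem.List.foldl_pyRange_pyGetD I 0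
    (fun m pj => PySem.List.pySetD m pj (PySem.Int.band (PySem.List.pyGetD m pj 0)
      (Int.not (PySem.Int.band (PySem.List.pyGetD m s 0) TF)))) _ (by omega)]
  have ht : ((t : Int) + 1).toNat = t + 1 := by omega
  rw [ht, hdrop1]
  exact pvClear_go TF s hs M' Q hlt

theorem pvDTup_defs (fF lF uF tF FL : Int) (a' b' c' d' : Option (List Int)) (vs : List Int) (nl : Bool) :
    pvDTup (pvBDefs [(fF, a'), (lF, b'), (uF, c'), (tF, d')] FL vs nl)
      = ((if PySem.Int.band FL fF ≠ 0 then (if nl then some vs else none) else a'),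
         (if PySem.Int.band FL lF ≠ 0 then (if nl then some vs else none) else b'),
         (if PySem.Int.band FL uF ≠ 0 then (if nl then some vs else none) else c'),
         (if PySem.Int.band FL tF ≠ 0 then (if nl then some vs else none) else d')) := by
  simp only [pvBDefs, List.map_cons, List.map_nil]
  by_cases h1 : PySem.Int.band FL fF ≠ 0 <;> by_cases h2 : PySem.Int.band FL lF ≠ 0 <;>
    by_cases h3 : PySem.Int.band FL uF ≠ 0 <;> by_cases h4 : PySem.Int.band FL tF ≠ 0 <;>
      simp [h1, h2, h3, h4, pvDTup]
theorem pvA2_go (fF lF uF tF nc vm : Int) :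
    ∀ (qs : List (Int × Int × List Int)) (P I : List Int) (t : Nat)
      (a b c d : Option (List Int)),
    pvGood qs →
    I.length = t + qs.length →
    I.drop t = pvStarts ((P.length : Nat) : Int) qs →
    (PySem.List.pyRange ((I.length : Int) - 1) ((t : Int) - 1) (-1)).foldl
        (pvA2Body fF lF uF tF nc vm I) (P ++ pvFlat qs, a, b, c, d)
      = (P ++ pvFlat (pvMask (pvTF4 fF lF uF tF)
            (pvProc nc vm qs [(fF, a), (lF, b), (uF, c), (tF, d)]).1 0),
         pvDTup (pvProc nc vm qs [(fF, a), (lF, b), (uF, c), (tF, d)]).2) := by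
  intro qs
  induction qs with
  | nil =>
    intro P I t a b d' e hg hlen hdrop
    have hlen' : I.length = t := by simpa using hlen
    rw [PySem.List.pyRange_neg_one_eq_nil (by omega)]
    simp [pvProc, pvMask, pvFlat, pvDTup]
  | cons e qs ih =>
    intro P I t a b c d hg hlen hdrop
    obtain ⟨g, cnt, vs⟩ := e
    obtain ⟨hc0, hle0, hlt0, hg'⟩ := hg
    have hc : 0 ≤ cnt := hc0
    have hle : vs.length ≤ cnt.toNat := hle0
    have hlt : vs.length < cnt.toNat → qs = [] := hlt0
    -- split the countdown range: process index t last
    have hsplit : PySem.List.pyRange ((I.length : Int) - 1) ((t : Int) - 1) (-1)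
        = PySem.List.pyRange ((I.length : Int) - 1) ((t : Int)) (-1) ++ [(t : Int)] := by
      rw [PySem.List.pyRange_neg_one_eq_reverse, PySem.List.pyRange_neg_one_eq_reverse]
      have e1 : (t : Int) - 1 + 1 = (t : Int) := by ring
      have e2 : (I.length : Int) - 1 + 1 = (I.length : Int) := by ring
      rw [e1, e2, PySem.List.pyRange_one_cons (by simp at hlen; omega), List.reverse_cons]
    rw [hsplit, List.foldl_append]
    -- the inner fold handles the suffix entries, via the induction hypothesis
    have hstate : P ++ pvFlat ((g, cnt, vs) :: qs) = (P ++ (g :: cnt :: vs)) ++ pvFlat qs := by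
      simp [pvFlat, pvBlock]
    have hdrop' : I.drop (t + 1) = pvStarts (((P ++ (g :: cnt :: vs)).length : Nat) : Int) qs := by
      have h1 : I.drop (t + 1) = (I.drop t).tail := by
        rw [← List.drop_one, List.drop_drop]
      rw [h1, hdrop, pvStarts]
      have : ((P.length : Int) + 2 + (vs.length : Int)) = (((P ++ (g :: cnt :: vs)).length : Nat) : Int) := by
        simp only [List.length_append, List.length_cons]; push_cast; ring
      simp [this]
    have hrange' : PySem.List.pyRange ((I.length : Int) - 1) ((t : Int)) (-1)
        = PySem.List.pyRange ((I.length : Int) - 1) (((t + 1 : Nat) : Int) - 1) (-1) := by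
      push_cast; ring_nf
    rw [hstate, hrange', ih (P ++ (g :: cnt :: vs)) I (t + 1) a b c d hg'
      (by simp at hlen ⊢; omega) hdrop']
    -- shape of the defaults after the suffix
    obtain ⟨a', b', c', d', hR⟩ := pvProc_defs_shape nc vm fF lF uF tF qs a b c d
    set TF := pvTF4 fF lF uF tF with hTF
    set ps' := (pvProc nc vm qs [(fF, a), (lF, b), (uF, c), (tF, d)]).1 with hps'
    set M' := pvMask TF ps' 0 with hM'
    -- the one remaining step at index t
    set R := (pvProc nc vm qs [(fF, a), (lF, b), (uF, c), (tF, d)]).2 with hRdef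
    have hDT : pvDTup R = (a', b', c', d') := by rw [hR]; simp [pvDTup]
    rw [hDT]
    have hstart : PySem.List.pyGetD I ((t : Nat) : Int) 0 = ((P.length : Nat) : Int) := by
      apply pvGetAtDrop I t _ _ 
      rw [hdrop, pvStarts]
    simp only [List.foldl_cons, List.foldl_nil]
    simp only [pvA2Body, hstart]
    rw [show (P ++ g :: cnt :: vs) ++ pvFlat M' = P ++ g :: cnt :: (vs ++ pvFlat M') by simp]
    have hcnt : PySem.List.pyGetD (P ++ g :: cnt :: (vs ++ pvFlat M')) ((P.length : Int) + 1) 0 = cnt :=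
      pvReadCnt P (vs ++ pvFlat M') g cnt 0
    rw [hcnt]
    have hMflat : vs.length < cnt.toNat → pvFlat M' = [] := by
      intro hl
      have hq : qs = [] := hlt hl
      subst hq
      simp [hM', hps', pvProc, pvMask, pvFlat]
    have hiv : PySem.List.slice (P ++ g :: cnt :: (vs ++ pvFlat M')) (some ((P.length : Int) + 2))
        (some ((P.length : Int) + 2 + cnt)) = vs := by
      rw [pvSliceVals P g cnt (vs ++ pvFlat M') hc, pvTakeVs vs (pvFlat M') cnt hle hMflat]
    rw [hiv]
    rw [pvAFlag1_eq, pvAFlag1_eq, pvAFlag1_eq, pvAFlag1_eq]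
    rw [← pvBStep1_lit fF lF uF tF a' b' c' d' g vs]
    set FL := pvBStep1 [(fF, a'), (lF, b'), (uF, c'), (tF, d')] g vs with hFL
    rw [pvReadFlag]
    -- the clearing loop result
    have hdrop1 : I.drop (t + 1) = pvStarts (((P ++ FL :: cnt :: vs).length : Nat) : Int) M' := by
      rw [hdrop']
      have e1 : ((P ++ g :: cnt :: vs).length : Nat) = ((P ++ FL :: cnt :: vs).length : Nat) := by simp
      rw [e1, hM', hps', pvMask_starts, pvProc_starts]
    have hTFr : PySem.Int.bor (PySem.Int.bor (PySem.Int.bor fF lF) uF) tF = TF := rfl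
    rw [hTFr]
    have hclear : pvAClear I ((P.length : Int)) TF ((t : Nat) : Int) (P ++ FL :: cnt :: (vs ++ pvFlat M'))
        = (P ++ FL :: cnt :: vs) ++ pvFlat (pvMask TF ps' (PySem.Int.bor 0 (PySem.Int.band FL TF))) := by
      rw [show P ++ FL :: cnt :: (vs ++ pvFlat M') = (P ++ FL :: cnt :: vs) ++ pvFlat M' by simp]
      rw [pvAClear_eq I (P ++ FL :: cnt :: vs) TF t M' ((P.length : Int)) (by omega)
        (by simp only [List.length_append, List.length_cons]; omega) hdrop1]
      have hgd : (P ++ FL :: cnt :: vs).getD ((P.length : Int)).toNat 0 = FL := by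
        have h0 : ((P.length : Int)).toNat = P.length := by omega
        rw [h0, List.getD_append_right _ _ _ _ (le_refl _)]
        simp
      rw [hgd, hM', pvMask_map]
    rw [hclear]
    rw [show (P ++ FL :: cnt :: vs) ++ pvFlat (pvMask TF ps' (PySem.Int.bor 0 (PySem.Int.band FL TF)))
        = P ++ FL :: cnt :: (vs ++ pvFlat (pvMask TF ps' (PySem.Int.bor 0 (PySem.Int.band FL TF)))) by simp]
    rw [pvReadFlag]
    -- unfold the entry-level suffix result on the right
    simp only [pvProc]
    rw [← hRdef, hR, ← hps', ← hFL]
    by_cases hnc : PySem.Int.band FL vm = nc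
    · have hbeq : (PySem.Int.band FL vm == nc) = true := by simp [hnc]
      rw [if_pos hnc, hbeq]
      rw [pvDTup_defs]
      simp [pvMask, pvBandNotZero, pvFlat, pvBlock]
    · have hbeq : (PySem.Int.band FL vm == nc) = false := by simp [hnc]
      rw [if_neg hnc, hbeq]
      rw [pvDTup_defs]
      simp [pvMask, pvBandNotZero, pvFlat, pvBlock, ← hM']
theorem pvA3_go (TF : Int) :
    ∀ (ps : List (Int × Int × List Int × Bool)) (Pq : List Int) (clear : Int)
      (out : List Int) (last : Option Int),
    pvGoodQ ps →
    (pvStarts ((Pq.length : Nat) : Int) (pvMask TF ps clear)).foldl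
        (pvA3Body TF (Pq ++ pvFlat (pvMask TF ps clear))) (out, last)
      = ((ps.foldl (pvBFwdBody TF) (out, last, clear)).1,
         (ps.foldl (pvBFwdBody TF) (out, last, clear)).2.1) := by
  intro ps
  induction ps with
  | nil => intro Pq clear out last _; simp [pvMask, pvStarts, pvFlat]
  | cons p ps ih =>
    intro Pq clear out last hg
    obtain ⟨hc0, hle0, hlt0, hg'⟩ := hg
    have hc : 0 ≤ p.2.1 := hc0
    have hle : p.2.2.1.length ≤ p.2.1.toNat := hle0
    set clear' := if p.2.2.2 = true then PySem.Int.bor clear (PySem.Int.band p.1 TF) else clear with hclear'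
    set F := PySem.Int.band p.1 (Int.not clear) with hF
    have hmask : pvMask TF (p :: ps) clear = (F, p.2.1, p.2.2.1) :: pvMask TF ps clear' := by
      rw [pvMask]
    rw [hmask, pvStarts, List.foldl_cons]
    have hMflat : p.2.2.1.length < p.2.1.toNat → pvFlat (pvMask TF ps clear') = [] := by
      intro hl
      have : ps = [] := hlt0 hl
      subst this
      simp [pvMask, pvFlat]
    -- the single step
    have hm : Pq ++ pvFlat ((F, p.2.1, p.2.2.1) :: pvMask TF ps clear')
        = Pq ++ F :: p.2.1 :: (p.2.2.1 ++ pvFlat (pvMask TF ps clear')) := by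
      simp [pvFlat, pvBlock]
    have hstep : pvA3Body TF (Pq ++ pvFlat ((F, p.2.1, p.2.2.1) :: pvMask TF ps clear')) (out, last) ((Pq.length : Nat) : Int)
        = ((pvBFwdBody TF (out, last, clear) p).1, (pvBFwdBody TF (out, last, clear) p).2.1) := by
      rw [hm]
      simp only [pvA3Body, pvBFwdBody, pvReadFlag, pvReadCnt]
      have hsl : PySem.List.slice (Pq ++ F :: p.2.1 :: (p.2.2.1 ++ pvFlat (pvMask TF ps clear')))
          (some ((Pq.length : Int))) (some ((Pq.length : Int) + 2 + p.2.1))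
          = F :: p.2.1 :: p.2.2.1 := by
        rw [pvSliceBlock Pq F p.2.1 _ hc, pvTakeVs p.2.2.1 _ p.2.1 hle hMflat]
      rw [hsl]
      have hsl2 : PySem.List.slice (F :: p.2.1 :: p.2.2.1) (some 2) none = p.2.2.1 := by
        rw [PySem.List.slice_from _ (by omega)]
        simp
      rw [hsl2, ← hF]
      by_cases h0 : PySem.Int.band F TF = 0
      · simp [h0]
      · cases last with
        | none => simp [h0]
        | some l =>
          by_cases hm2 : PySem.List.slice out (some (l + 2)) none = p.2.2.1 ∧
              PySem.Int.band (PySem.List.pyGetD out l 0) (Int.not TF) = PySem.Int.band F (Int.not TF)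
          · simp [h0, hm2]
          · simp [h0, hm2]
    rw [hstep]
    -- the remaining entries
    have hassoc : Pq ++ pvFlat ((F, p.2.1, p.2.2.1) :: pvMask TF ps clear')
        = (Pq ++ F :: p.2.1 :: p.2.2.1) ++ pvFlat (pvMask TF ps clear') := by
      simp [pvFlat, pvBlock]
    have hoff : (Pq.length : Int) + 2 + (p.2.2.1.length : Int)
        = (((Pq ++ F :: p.2.1 :: p.2.2.1).length : Nat) : Int) := by
      simp only [List.length_append, List.length_cons]
      push_cast
      ring
    rw [hassoc, hoff, ih (Pq ++ F :: p.2.1 :: p.2.2.1) clear'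
      (pvBFwdBody TF (out, last, clear) p).1 (pvBFwdBody TF (out, last, clear) p).2.1 hg']
    have hc2 : (pvBFwdBody TF (out, last, clear) p).2.2 = clear' := by
      simp only [pvBFwdBody]
      rw [← hclear']
      by_cases h0 : PySem.Int.band (PySem.Int.band p.1 (Int.not clear)) TF = 0
      · simp [h0]
      · cases last with
        | none => simp [h0]
        | some l =>
          simp only [h0]
          split_ifs <;> simp
    rw [List.foldl_cons]
    have hst : ((pvBFwdBody TF (out, last, clear) p).1, (pvBFwdBody TF (out, last, clear) p).2.1, clear')
        = pvBFwdBody TF (out, last, clear) p := by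
      rw [← hc2]
    rw [hst]
theorem pvStarts_len : ∀ (es : List (Int × Int × List Int)) (o : Int), (pvStarts o es).length = es.length := by
  intro es
  induction es with
  | nil => intro o; simp [pvStarts]
  | cons e es ih => intro o; simp [pvStarts, ih]

-- ===== VERDICT (by name: the statement is the Claim_ definition above) =====
theorem TranslateCleanupCaseMap_py_spec : Claim_equal_TranslateCleanupCaseMap_py := by
  intro values fF lF uF tF nc vm _hdom hpre
  unfold Spec_TranslateCleanupCaseMap_py
  obtain ⟨hne, hcase⟩ := hpre
  by_cases h1 : values.length = 1
  · unfold TranslateCleanupCaseMap_py TranslateCleanupCaseMap_py_alt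
    rw [if_pos h1, if_pos h1]
  · have hwf : pvWF values = true := by tauto
    unfold TranslateCleanupCaseMap_py TranslateCleanupCaseMap_py_alt
    rw [if_neg h1, if_neg h1]
    dsimp only
    have hflat : pvFlat (pvEnts values) = values := pvWF_flat values hwf
    have hgood : pvGood (pvEnts values) := pvWF_good values hwf
    have h0 : values.length ≠ 0 := by simpa [List.length_eq_zero_iff] using hne
    have hlen2 : 2 ≤ values.length := by omega
    set es := pvEnts values with hes
    have hesne : es ≠ [] := by
      intro h
      rw [h] at hflat
      simp [pvFlat] at hflat
      simp [hflat] at h0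
    have hcnt2 : 2 * es.length ≤ values.length := by
      have := pvFlat_len_ge es
      rw [hflat] at this
      exact this
    have hesne1 : 1 ≤ es.length := by
      have : es.length ≠ 0 := by simpa [List.length_eq_zero_iff] using hesne
      omega
    -- A: the index chain is the list of entry starts
    have hidx : pvAIndices values values.length [0] = pvStarts 0 es := by
      cases hesv : es with
      | nil => exact absurd hesv hesne
      | cons e es' =>
        have hg2 : pvGood (e :: es') := by rw [← hesv]; exact hgood
        have hres := pvAIndices_go (e :: es') [] [0] values.length hg2 (by simp)
          (by decide)
          (by rw [hesv] at hcnt2; simp at hcnt2 ⊢; omega)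
        rw [← hesv] at hres hg2
        rw [hflat] at hres
        simp at hres
        rw [hres, hesv, pvStarts]
        simp
    rw [hidx]
    -- A: phase 2 via the entry-level simulation
    have hA2 := pvA2_go fF lF uF tF nc vm es [] (pvStarts 0 es) 0
      (some [0]) (some [0]) (some [0]) (some [0]) hgood
      (by simp [pvStarts_len]) (by simp)
    simp only [List.nil_append] at hA2
    rw [hflat] at hA2
    have hr0 : ((0 : Nat) : Int) - 1 = -1 := by norm_num
    rw [hr0] at hA2
    rw [hA2]
    -- A: phase 3 via the forward simulation
    set TF := pvTF4 fF lF uF tF with hTF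
    set ps := (pvProc nc vm es [(fF, some [0]), (lF, some [0]), (uF, some [0]), (tF, some [0])]).1 with hps
    have hsts : pvStarts 0 es = pvStarts ((([] : List Int).length : Nat) : Int) (pvMask TF ps 0) := by
      rw [pvMask_starts, hps, pvProc_starts]
      norm_num
    have hgq : pvGoodQ ps := pvProc_good nc vm es _ hgood
    have hA3 := pvA3_go TF ps [] 0 [] none hgq
    simp only [List.nil_append] at hA3
    rw [show PySem.Int.bor (PySem.Int.bor (PySem.Int.bor fF lF) uF) tF = TF from rfl]
    rw [hsts, hA3]
    -- B: parse, reverse pass, forward pass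
    have hparse : pvBParse values.length values = es := by
      rw [hes]
      exact pvParse_eq values.length values hwf (by omega)
    rw [hparse]
    rw [pvRev_eq nc vm es [] [(fF, some [0]), (lF, some [0]), (uF, some [0]), (tF, some [0])]]
    simp only [List.nil_append, List.reverse_reverse]
    rw [← hps]
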